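-- pv_equiv track=rewrite | github.com/DragunWF/Competitive-Programming | CodeWars/python/7_kyu/rotate_for_a_max.py | max_rot
-- ===== SOURCE A (Python) =====
-- def max_rot(n: int) -> int:
--     rotations = []
--     digits = [*str(n)]
--     for i in range(len(digits)):
--         rotations.append(int("".join(digits)))
--         for j in range(i, len(digits) - 1):
--             digits[j], digits[j + 1] = digits[j + 1], digits[j]
--     return max(rotations)
-- ===== SOURCE B (Python) =====
-- def max_rot(n: int) -> int:
--     s = str(n)
--     best = int(s)
--     for i in range(len(s) - 1):
--         s = s[:i] + s[i + 1:] + s[i]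
--         best = max(best, int(s))
--     return best
-- ===== Notes on version B (the rewrite author's own statement) =====
-- stated objective: simpler
-- what changed: B keeps a running max over a single pass instead of collecting every rotation in a list and taking max at the end, and produces each successive rotation with one slice s[:i]+s[i+1:]+s[i] instead of A's inner loop of adjacent swaps on a mutable char list.
import Mathlib
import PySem

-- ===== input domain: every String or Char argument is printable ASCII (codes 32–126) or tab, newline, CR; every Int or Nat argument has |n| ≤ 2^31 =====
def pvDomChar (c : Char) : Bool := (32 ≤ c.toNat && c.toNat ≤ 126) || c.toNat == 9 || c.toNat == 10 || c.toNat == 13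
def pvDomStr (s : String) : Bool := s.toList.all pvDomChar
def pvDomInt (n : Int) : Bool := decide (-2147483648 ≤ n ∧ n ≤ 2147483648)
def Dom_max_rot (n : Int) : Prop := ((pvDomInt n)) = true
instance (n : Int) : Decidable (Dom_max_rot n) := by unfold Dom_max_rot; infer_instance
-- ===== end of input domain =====

-- B replaces A's collect-all-rotations-then-max with a running max in a single pass, and
-- replaces A's inner adjacent-swap loop by one direct slice rotation per step (objective: simpler).

-- ===== PORT A =====
-- digits[j], digits[j+1] = digits[j+1], digits[j]  (indices are always in range inside the loop)
def aSwap (ds : List Char) (j : Int) : List Char :=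
  let a := PySem.List.pyGetD ds j ' '
  let b := PySem.List.pyGetD ds (j + 1) ' '
  PySem.List.pySetD (PySem.List.pySetD ds j b) (j + 1) a

-- the inner loop: for j in range(i, len(digits) - 1)
def aInner (ds : List Char) (i : Int) : List Char :=
  (PySem.List.pyRange i ((ds.length : Int) - 1) 1).foldl aSwap ds

-- one outer iteration: rotations.append(int("".join(digits))), then the inner loop.
-- int(...) raises ValueError when the chars are not an int literal — that happens only
-- outside Pre_, so the .getD 0 default is never the returned value inside Pre_.
def aStep (st : List Int × List Char) (i : Int) : List Int × List Char :=
  (st.1 ++ [(PySem.Int.ofChars? st.2).getD 0], aInner st.2 i)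

def max_rot (n : Int) : Int :=
  let digits := PySem.Int.toChars n
  let st := (PySem.List.pyRange 0 (digits.length : Int) 1).foldl aStep ([], digits)
  -- max(rotations): the list is never empty (len(str(n)) ≥ 1), so Python's max never raises
  (PySem.List.max? st.1 (fun x => x)).getD 0

-- ===== PORT B =====
-- s = s[:i] + s[i+1:] + s[i]
def bRot (s : List Char) (i : Int) : List Char :=
  PySem.List.slice s none (some i) ++ PySem.List.slice s (some (i + 1)) none
    ++ [PySem.List.pyGetD s i ' ']

-- one iteration: rotate, then best = max(best, int(s))  (int raises only outside Pre_, see aStep)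
def bStep (st : Int × List Char) (i : Int) : Int × List Char :=
  let s := bRot st.2 i
  (max st.1 ((PySem.Int.ofChars? s).getD 0), s)

def max_rot_alt (n : Int) : Int :=
  let s := PySem.Int.toChars n
  ((PySem.List.pyRange 0 ((s.length : Int) - 1) 1).foldl bStep
    ((PySem.Int.ofChars? s).getD 0, s)).1

-- ===== PRECONDITION & SPEC =====
-- For negative n the first rotation moves '-' away from the front and int("".join(...)) raises
-- ValueError in A (B raises the same way); Pre_ excludes exactly those inputs.
def Pre_max_rot (n : Int) : Prop := 0 ≤ n
instance (n : Int) : Decidable (Pre_max_rot n) := by unfold Pre_max_rot; infer_instance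

def pvWitness_max_rot : Int := 12453

def Spec_max_rot (n : Int) (out : Int) : Prop := out = max_rot_alt n
instance (n : Int) (out : Int) : Decidable (Spec_max_rot n out) := by unfold Spec_max_rot; infer_instance

-- ===== CLAIM (what is proved, stated in full; the proofs are below) =====
def Claim_equal_max_rot : Prop := ∀ (n : Int), Dom_max_rot n → Pre_max_rot n → Spec_max_rot n (max_rot n)

-- ===== LEMMAS AND PROOFS =====

-- str(n) is never the empty string
theorem toChars_ne_nil (n : Int) : PySem.Int.toChars n ≠ [] := by
  have key : ∀ (f m : Nat) (acc : List Char), m < f → Nat.toDigitsCore 10 f m acc ≠ [] := by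
    intro f
    induction f with
    | zero => intro m acc h; omega
    | succ f ih =>
      intro m acc h
      simp only [Nat.toDigitsCore]
      split
      · simp
      · exact ih (m / 10) _ (lt_of_lt_of_le (Nat.div_lt_self (by omega) (by norm_num)) (by omega))
  unfold PySem.Int.toChars
  split
  · simp
  · exact key _ _ _ (by omega)

-- one adjacent swap in take/append form
theorem aSwap_eq (l : List Char) (j : Nat) (h : j + 1 < l.length) :
    aSwap l (j : Int) = l.take j ++ l.getD (j + 1) ' ' :: l.getD j ' ' :: l.drop (j + 2) := by
  unfold aSwap
  have hc : ((j : Int) + 1) = ((j + 1 : Nat) : Int) := by push_cast; ring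
  rw [hc, PySem.List.pyGetD_natCast, PySem.List.pyGetD_natCast,
      PySem.List.pySetD_natCast, PySem.List.pySetD_natCast]
  simp only [List.getD_eq_getElem _ _ (by omega : j < l.length),
             List.getD_eq_getElem _ _ (by omega : j + 1 < l.length)]
  apply List.ext_getElem
  · simp; omega
  · intro i h1 h2
    simp only [List.length_set] at h1
    by_cases hi1 : i < j
    · rw [List.getElem_append_left (by simp; omega)]
      simp only [List.getElem_set, List.getElem_take]
      split_ifs <;> first | rfl | omega
    · by_cases hi2 : i = j
      · subst hi2
        rw [List.getElem_append_right (by simp)]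
        simp only [List.length_take]
        have h0 : i - min i l.length = 0 := by omega
        simp only [h0, List.getElem_cons_zero, List.getElem_set]
        split_ifs <;> first | rfl | omega
      · by_cases hi3 : i = j + 1
        · subst hi3
          rw [List.getElem_append_right (by simp)]
          simp only [List.length_take]
          have h0 : j + 1 - min j l.length = 1 := by omega
          simp only [h0, List.getElem_cons_succ, List.getElem_cons_zero, List.getElem_set]
          split_ifs <;> first | rfl | omega
        · rw [List.getElem_append_right (by simp; omega)]
          simp only [List.length_take]
          have h0 : i - min j l.length = (i - j - 2) + 1 + 1 := by omega
          simp only [h0, List.getElem_cons_succ, List.getElem_set, List.getElem_drop]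
          split_ifs <;> first | (congr 1; omega) | omega

-- B's rotation step in take/drop form (natural index)
theorem bRot_eq (l : List Char) (j : Nat) :
    bRot l (j : Int) = l.take j ++ l.drop (j + 1) ++ [l.getD j ' '] := by
  unfold bRot
  rw [PySem.List.slice_to_natCast]
  have hc : ((j : Int) + 1) = ((j + 1 : Nat) : Int) := by push_cast; ring
  rw [hc, PySem.List.slice_from_natCast, PySem.List.pyGetD_natCast]

-- A's inner adjacent-swap loop computes exactly B's one-step rotation
theorem swap_fold (d : Nat) : ∀ (j : Nat) (l : List Char), j < l.length → l.length - 1 - j = d →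
    (PySem.List.pyRange (j : Int) ((l.length : Int) - 1) 1).foldl aSwap l = bRot l (j : Int) := by
  induction d with
  | zero =>
    intro j l h hd
    rw [PySem.List.pyRange_one_eq_nil (by omega), bRot_eq l j]
    simp only [List.foldl_nil]
    have hj : j = l.length - 1 := by omega
    subst hj
    have hne : l ≠ [] := by intro hnil; simp [hnil] at h
    rw [List.getD_eq_getElem l ' ' h, List.drop_eq_nil_of_le (by omega)]
    conv_lhs => rw [← List.dropLast_append_getLast hne]
    rw [List.dropLast_eq_take, List.getLast_eq_getElem]
    simp
  | succ d ih =>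
    intro j l h hd
    rw [PySem.List.pyRange_one_cons (by omega), List.foldl_cons]
    rw [aSwap_eq l j (by omega)]
    set b := l.getD (j + 1) ' ' with hb
    set a := l.getD j ' ' with ha
    set l' := l.take j ++ b :: a :: l.drop (j + 2) with hl'
    have hlen' : l'.length = l.length := by simp [hl']; omega
    have hc : ((j : Int) + 1) = ((j + 1 : Nat) : Int) := by push_cast; ring
    have hy := ih (j + 1) l' (by omega) (by omega)
    rw [hlen'] at hy
    rw [hc, hy, bRot_eq, bRot_eq]
    have htj : (l.take j).length = j := by simp; omega
    have ht : l'.take (j + 1) = l.take j ++ [b] := by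
      rw [hl']
      conv_lhs => rw [show j + 1 = (l.take j).length + 1 from by omega]
      rw [List.take_length_add_append]
      rfl
    have hdr : l'.drop (j + 2) = l.drop (j + 2) := by
      have h2 := List.drop_length_add_append (l₁ := l.take j) (l₂ := b :: a :: l.drop (j + 2)) 2
      rw [htj] at h2
      rw [hl', h2]
      rfl
    have hgd : l'.getD (j + 1) ' ' = a := by
      rw [hl', List.getD_append_right _ _ ' ' (j + 1) (by omega)]
      simp [htj]
    rw [ht, hdr, hgd]
    rw [List.drop_eq_getElem_cons (by omega : j + 1 < l.length)]
    rw [hb, List.getD_eq_getElem l ' ' (by omega : j + 1 < l.length)]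
    simp
    rfl

-- int("".join(cs)) totalised the way both ports write it
def pvVal (cs : List Char) : Int := (PySem.Int.ofChars? cs).getD 0

-- trajectory of rotated strings (state after each iteration), k steps starting at index a
def pvSts (a : Int) (k : Nat) (l : List Char) : List (List Char) :=
  match k with
  | 0 => []
  | Nat.succ k => bRot l a :: pvSts (a + 1) k (bRot l a)

-- state at the start of each of k iterations
def pvPre (a : Int) (k : Nat) (l : List Char) : List (List Char) :=
  match k with
  | 0 => []
  | Nat.succ k => l :: pvPre (a + 1) k (bRot l a)

-- final state after k steps
def pvEnd (a : Int) (k : Nat) (l : List Char) : List Char :=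
  match k with
  | 0 => l
  | Nat.succ k => pvEnd (a + 1) k (bRot l a)

theorem length_bRot (l : List Char) (j : Nat) (h : j < l.length) :
    (bRot l (j : Int)).length = l.length := by
  rw [bRot_eq l j]
  simp
  omega

theorem aInner_eq_bRot (l : List Char) (a : Int) (h0 : 0 ≤ a) (h1 : a < (l.length : Int)) :
    aInner l a = bRot l a := by
  obtain ⟨j, rfl⟩ : ∃ j : Nat, a = (j : Int) := ⟨a.toNat, (Int.toNat_of_nonneg h0).symm⟩
  exact swap_fold (l.length - 1 - j) j l (by omega) rfl

-- A's outer loop collects the values of the start-of-iteration states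
theorem A_fold (k : Nat) : ∀ (a : Int) (l : List Char) (r : List Int),
    0 ≤ a → a + k ≤ (l.length : Int) →
    (PySem.List.pyRange a (a + k) 1).foldl aStep (r, l)
      = (r ++ (pvPre a k l).map pvVal, pvEnd a k l) := by
  induction k with
  | zero =>
    intro a l r h0 h1
    rw [show a + ((0:Nat):Int) = a by push_cast; ring, PySem.List.pyRange_one_eq_nil le_rfl]
    simp [pvPre, pvEnd]
  | succ k ih =>
    intro a l r h0 h1
    rw [PySem.List.pyRange_one_cons (by push_cast at h1 ⊢; omega), List.foldl_cons]
    have hstep : aStep (r, l) a = (r ++ [pvVal l], bRot l a) := by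
      unfold aStep
      rw [aInner_eq_bRot l a h0 (by push_cast at h1; omega)]
      rfl
    rw [hstep]
    have hrng : a + ((k+1 : Nat) : Int) = (a + 1) + (k : Int) := by push_cast; ring
    rw [hrng]
    have hlen : ((bRot l a).length : Int) = (l.length : Int) := by
      obtain ⟨j, rfl⟩ : ∃ j : Nat, a = (j : Int) := ⟨a.toNat, (Int.toNat_of_nonneg h0).symm⟩
      rw [length_bRot l j (by push_cast at h1; omega)]
    rw [ih (a + 1) (bRot l a) (r ++ [pvVal l]) (by omega) (by rw [hlen]; push_cast at h1 ⊢; omega)]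
    show _ = (r ++ (pvVal l :: (pvPre (a+1) k (bRot l a)).map pvVal), pvEnd (a+1) k (bRot l a))
    simp

-- B's loop is the running max of the values of the end-of-iteration states
theorem B_fold (k : Nat) : ∀ (a : Int) (l : List Char) (x : Int),
    0 ≤ a → a + k ≤ (l.length : Int) →
    (PySem.List.pyRange a (a + k) 1).foldl bStep (x, l)
      = (((pvSts a k l).map pvVal).foldl max x, pvEnd a k l) := by
  induction k with
  | zero =>
    intro a l x h0 h1
    rw [show a + ((0:Nat):Int) = a by push_cast; ring, PySem.List.pyRange_one_eq_nil le_rfl]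
    simp [pvSts, pvEnd]
  | succ k ih =>
    intro a l x h0 h1
    rw [PySem.List.pyRange_one_cons (by push_cast at h1 ⊢; omega), List.foldl_cons]
    have hstep : bStep (x, l) a = (max x (pvVal (bRot l a)), bRot l a) := rfl
    rw [hstep]
    have hrng : a + ((k+1 : Nat) : Int) = (a + 1) + (k : Int) := by push_cast; ring
    rw [hrng]
    have hlen : ((bRot l a).length : Int) = (l.length : Int) := by
      obtain ⟨j, rfl⟩ : ∃ j : Nat, a = (j : Int) := ⟨a.toNat, (Int.toNat_of_nonneg h0).symm⟩
      rw [length_bRot l j (by push_cast at h1; omega)]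
    rw [ih (a + 1) (bRot l a) (max x (pvVal (bRot l a))) (by omega) (by rw [hlen]; push_cast at h1 ⊢; omega)]
    show _ = (((pvVal (bRot l a) :: (pvSts (a+1) k (bRot l a)).map pvVal)).foldl max x, pvEnd (a+1) k (bRot l a))
    simp

-- the k+1 start-of-iteration states are the start string followed by the first k end states
theorem pvPre_succ (k : Nat) : ∀ (a : Int) (l : List Char),
    pvPre a (k + 1) l = l :: pvSts a k l := by
  induction k with
  | zero => intro a l; rfl
  | succ k ih =>
    intro a l
    show l :: pvPre (a + 1) (k + 1) (bRot l a) = l :: bRot l a :: pvSts (a + 1) k (bRot l a)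
    rw [ih]

-- ===== VERDICT (by name: the statement is the Claim_ definition above) =====
theorem max_rot_spec : Claim_equal_max_rot := by
  intro n _ _
  unfold Spec_max_rot max_rot max_rot_alt
  set L := PySem.Int.toChars n with hL
  have hm : 1 ≤ L.length := List.length_pos_of_ne_nil (toChars_ne_nil n)
  obtain ⟨m, hm1⟩ : ∃ m : Nat, L.length = m + 1 := ⟨L.length - 1, by omega⟩
  have hA := A_fold (m + 1) 0 L [] le_rfl (by push_cast; omega)
  have hB := B_fold m 0 L (pvVal L) le_rfl (by omega)
  rw [zero_add] at hA hB
  simp only []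
  rw [hm1]
  rw [show ((m + 1 : Nat) : Int) - 1 = ((m : Nat) : Int) by push_cast; ring]
  rw [show (PySem.Int.ofChars? L).getD 0 = pvVal L from rfl]
  rw [hA, hB, List.nil_append, pvPre_succ m 0 L, List.map_cons, PySem.List.max?_id_cons]
  rfl
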